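-- pv_equiv track=rewrite | github.com/ogiekako/pub_polycover | hardness/search_hardness_gadget.py | set_to_rows
-- ===== SOURCE A (Python) =====
-- def set_to_rows(cells, n):
--     rows = []
--     for y in range(n):
--         row = []
--         for x in range(n):
--             row.append('1' if (x, y) in cells else '0')
--         rows.append(''.join(row))
--     return rows
-- ===== SOURCE B (Python) =====
-- def set_to_rows(cells, n):
--     grid = [['0'] * n for _ in range(n)]
--     for x, y in cells:
--         if 0 <= x < n and 0 <= y < n:
--             grid[y][x] = '1'
--     return [''.join(row) for row in grid]
-- ===== Notes on version B (the rewrite author's own statement) =====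
-- stated objective: faster
-- what changed: B scatters each cell once into a prebuilt n-by-n '0' grid and joins the rows, instead of A's gather that tests set membership at every one of the n*n coordinates.
import Mathlib
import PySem

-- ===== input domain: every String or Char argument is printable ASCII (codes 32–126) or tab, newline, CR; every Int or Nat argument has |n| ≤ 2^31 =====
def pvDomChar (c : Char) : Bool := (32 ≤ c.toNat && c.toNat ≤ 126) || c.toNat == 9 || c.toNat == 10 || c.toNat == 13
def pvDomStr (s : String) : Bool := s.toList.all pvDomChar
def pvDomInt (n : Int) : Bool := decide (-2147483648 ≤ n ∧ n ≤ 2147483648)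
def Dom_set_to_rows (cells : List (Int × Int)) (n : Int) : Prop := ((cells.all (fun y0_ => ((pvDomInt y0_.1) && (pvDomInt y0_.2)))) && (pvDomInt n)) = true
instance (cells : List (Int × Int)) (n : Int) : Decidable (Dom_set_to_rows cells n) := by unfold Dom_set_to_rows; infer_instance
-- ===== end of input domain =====

-- B scatters each cell once into a prebuilt n×n '0' grid instead of A's per-coordinate membership gather.

-- ===== PORT A =====
def set_to_rows (cells : List (Int × Int)) (n : Int) : List String :=
  (PySem.List.pyRange 0 n 1).foldl (fun rows y =>
    rows ++ [String.ofList ((PySem.List.pyRange 0 n 1).foldl (fun row x =>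
      row ++ [if (x, y) ∈ cells then '1' else '0']) [])]) []

-- ===== PORT B =====
-- one in-place update grid[y][x] = '1' (guarded by the range test), as in Source B
def pvScatter (n : Int) (g : List (List Char)) (p : Int × Int) : List (List Char) :=
  if 0 ≤ p.1 ∧ p.1 < n ∧ 0 ≤ p.2 ∧ p.2 < n then
    g.set p.2.toNat ((g.getD p.2.toNat []).set p.1.toNat '1')
  else g

def set_to_rows_alt (cells : List (Int × Int)) (n : Int) : List String :=
  let grid0 : List (List Char) := List.replicate n.toNat (List.replicate n.toNat '0')
  (cells.foldl (pvScatter n) grid0).map String.ofList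

-- ===== PRECONDITION & SPEC =====
def Spec_set_to_rows (cells : List (Int × Int)) (n : Int) (out : List String) : Prop := out = set_to_rows_alt cells n
instance (cells : List (Int × Int)) (n : Int) (out : List String) : Decidable (Spec_set_to_rows cells n out) := by unfold Spec_set_to_rows; infer_instance

-- ===== CLAIM (what is proved, stated in full; the proofs are below) =====
def Claim_equal_set_to_rows : Prop := ∀ (cells : List (Int × Int)) (n : Int), Dom_set_to_rows cells n → Spec_set_to_rows cells n (set_to_rows cells n)

-- ===== LEMMAS AND PROOFS =====

theorem pvScatter_length (n : Int) (g : List (List Char)) (p : Int × Int) :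
    (pvScatter n g p).length = g.length := by
  unfold pvScatter; split <;> simp

theorem pv_foldl_length (n : Int) (cs : List (Int × Int)) (g : List (List Char)) :
    (cs.foldl (pvScatter n) g).length = g.length := by
  induction cs generalizing g with
  | nil => rfl
  | cons p cs ih => simp only [List.foldl_cons]; rw [ih, pvScatter_length]

theorem pv_foldl_rows (n : Int) (cs : List (Int × Int)) :
    ∀ g : List (List Char), g.length = n.toNat → (∀ r ∈ g, r.length = n.toNat) →
    ∀ r ∈ cs.foldl (pvScatter n) g, r.length = n.toNat := by
  induction cs with
  | nil => intro g _ hr r hm; exact hr r hm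
  | cons p cs ih =>
    intro g hg hr r hm
    refine ih (pvScatter n g p) (by rw [pvScatter_length]; exact hg) ?_ r hm
    intro r' hr'
    unfold pvScatter at hr'
    split at hr'
    · rename_i hc
      rcases List.mem_or_eq_of_mem_set hr' with h | h
      · exact hr r' h
      · subst h
        have hy : p.2.toNat < g.length := by omega
        rw [List.length_set, List.getD_eq_getElem _ _ hy]
        exact hr _ (List.getElem_mem hy)
    · exact hr r' hr'

theorem pv_foldl_getD (n : Int) (cs : List (Int × Int)) :
    ∀ g : List (List Char), g.length = n.toNat → (∀ r ∈ g, r.length = n.toNat) →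
    ∀ x y : Nat, x < n.toNat → y < n.toNat →
    ((cs.foldl (pvScatter n) g).getD y []).getD x '0'
      = if ((x : Int), (y : Int)) ∈ cs then '1' else (g.getD y []).getD x '0' := by
  induction cs with
  | nil => intro g _ _ x y _ _; simp
  | cons p cs ih =>
    intro g hg hr x y hx hy
    have hxy : (0:Int) ≤ (x:Int) ∧ (x:Int) < n ∧ (0:Int) ≤ (y:Int) ∧ (y:Int) < n := by omega
    have hstep := ih (pvScatter n g p) (by rw [pvScatter_length]; exact hg)
      (pv_foldl_rows n [p] g hg hr) x y hx hy
    simp only [List.foldl_cons]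
    rw [hstep]
    by_cases hmem : ((x : Int), (y : Int)) ∈ cs
    · simp [hmem]
    · simp only [List.mem_cons, hmem, or_false, if_false]
      have hylen : y < g.length := by omega
      have hrowlen : (g.getD y []).length = n.toNat := by
        rw [List.getD_eq_getElem _ _ hylen]; exact hr _ (List.getElem_mem hylen)
      by_cases hp : ((x : Int), (y : Int)) = p
      · rw [if_pos hp]
        have hc : 0 ≤ p.1 ∧ p.1 < n ∧ 0 ≤ p.2 ∧ p.2 < n := by rw [← hp]; exact hxy
        unfold pvScatter
        rw [if_pos hc]
        have hp1 : p.1.toNat = x := by rw [← hp]; simp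
        have hp2 : p.2.toNat = y := by rw [← hp]; simp
        rw [hp1, hp2]
        have houter : (g.set y ((g.getD y []).set x '1')).getD y []
            = (g.getD y []).set x '1' := by
          rw [List.getD_eq_getElem _ _ (by rw [List.length_set]; exact hylen)]
          rw [List.getElem_set, if_pos rfl]
        rw [houter]
        rw [List.getD_eq_getElem _ _ (by rw [List.length_set]; omega)]
        rw [List.getElem_set, if_pos rfl]
      · rw [if_neg hp]
        unfold pvScatter
        split
        · rename_i hc
          by_cases hyy : p.2.toNat = y
          · have hxx : p.1.toNat ≠ x := by
              intro hxx
              apply hp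
              have hpp : p = (p.1, p.2) := rfl
              rw [hpp]
              have h1 : p.1 = (x : Int) := by omega
              have h2 : p.2 = (y : Int) := by omega
              rw [h1, h2]
            rw [hyy]
            have houter : (g.set y ((g.getD y []).set p.1.toNat '1')).getD y []
                = (g.getD y []).set p.1.toNat '1' := by
              rw [List.getD_eq_getElem _ _ (by rw [List.length_set]; exact hylen)]
              rw [List.getElem_set, if_pos rfl]
            rw [houter]
            rw [List.getD_eq_getElem _ _ (by rw [List.length_set]; omega)]
            rw [List.getElem_set, if_neg hxx]
            exact (List.getD_eq_getElem _ _ (by omega)).symm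
          · have houter : (g.set p.2.toNat ((g.getD p.2.toNat []).set p.1.toNat '1')).getD y []
                = g.getD y [] := by
              rw [List.getD_eq_getElem _ _ (by rw [List.length_set]; exact hylen)]
              rw [List.getElem_set, if_neg hyy, List.getD_eq_getElem _ _ hylen]
            rw [houter]
        · rfl

theorem set_to_rows_spec : Claim_equal_set_to_rows := by
  intro cells n _
  unfold Spec_set_to_rows set_to_rows set_to_rows_alt
  simp only [PySem.List.foldl_append_singleton_eq_map, List.nil_append]
  have hrange : PySem.List.pyRange 0 n 1
      = (List.range n.toNat).map (fun k : Nat => (k : Int)) := by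
    rw [PySem.List.pyRange_one]; simp only [sub_zero, zero_add]
  rw [hrange]
  have hrow0 : ∀ r ∈ List.replicate n.toNat (List.replicate n.toNat ('0' : Char)),
      r.length = n.toNat := by
    intro r hr; exact (List.eq_of_mem_replicate hr) ▸ (by simp)
  have key : cells.foldl (pvScatter n)
      (List.replicate n.toNat (List.replicate n.toNat '0'))
      = (List.range n.toNat).map (fun y : Nat =>
          (List.range n.toNat).map (fun x : Nat =>
            if ((x : Int), (y : Int)) ∈ cells then '1' else '0')) := by
    apply List.ext_getElem
    · rw [pv_foldl_length]; simp
    · intro y hy1 hy2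
      have hyN : y < n.toNat := by
        have := hy1; rw [pv_foldl_length] at this; simpa using this
      have hrlen := pv_foldl_rows n cells _ (by simp) hrow0 _ (List.getElem_mem hy1)
      apply List.ext_getElem
      · simp [hrlen]
      · intro x hx1 hx2
        have hxN : x < n.toNat := by omega
        have hval := pv_foldl_getD n cells
          (List.replicate n.toNat (List.replicate n.toNat '0'))
          (by simp) hrow0 x y hxN hyN
        rw [List.getD_eq_getElem _ _ hy1, List.getD_eq_getElem _ _ hx1] at hval
        rw [hval]
        simp [hyN, hxN]
  rw [key, List.map_map]
  simp only [List.map_map, Function.comp_def]
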